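-- pv_equiv track=rewrite | github.com/softlab-unimore/wym | wym/WordPairGenerator.py | get_attr_map
-- ===== SOURCE A (Python) =====
-- def get_attr_map(words_dict):
--     attr_len = [len(x) if x != [''] else 0 for x in words_dict.values()]
--     pos_to_attr_map = {}
--     pos = 0
--     for i, attr in enumerate(words_dict.keys()):
--         for word_pos in range(pos, pos + attr_len[i]):
--             pos_to_attr_map[word_pos] = attr
--         pos += attr_len[i]
--     pos_to_attr_map[-1] = '[UNP]'
--     return pos_to_attr_map
-- ===== SOURCE B (Python) =====
-- def get_attr_map(words_dict):
--     attrs = list(words_dict.keys())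
--     bounds = []
--     total = 0
--     for words in words_dict.values():
--         total += len(words) if words != [''] else 0
--         bounds.append(total)
--     pos_to_attr_map = {}
--     for i in range(total):
--         lo, hi = 0, len(bounds)
--         while lo < hi:
--             mid = (lo + hi) // 2
--             if bounds[mid] <= i:
--                 lo = mid + 1
--             else:
--                 hi = mid
--         pos_to_attr_map[i] = attrs[lo]
--     pos_to_attr_map[-1] = '[UNP]'
--     return pos_to_attr_map
-- ===== Notes on version B (the rewrite author's own statement) =====
-- stated objective: alternative
-- what changed: B replaces A's single sweep that emits each attribute's index range from a running counter by a two-stage algorithm: it first builds a prefix-sum table of cumulative word counts, then resolves each position independently with a hand-written binary search over that table.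
import Mathlib
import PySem

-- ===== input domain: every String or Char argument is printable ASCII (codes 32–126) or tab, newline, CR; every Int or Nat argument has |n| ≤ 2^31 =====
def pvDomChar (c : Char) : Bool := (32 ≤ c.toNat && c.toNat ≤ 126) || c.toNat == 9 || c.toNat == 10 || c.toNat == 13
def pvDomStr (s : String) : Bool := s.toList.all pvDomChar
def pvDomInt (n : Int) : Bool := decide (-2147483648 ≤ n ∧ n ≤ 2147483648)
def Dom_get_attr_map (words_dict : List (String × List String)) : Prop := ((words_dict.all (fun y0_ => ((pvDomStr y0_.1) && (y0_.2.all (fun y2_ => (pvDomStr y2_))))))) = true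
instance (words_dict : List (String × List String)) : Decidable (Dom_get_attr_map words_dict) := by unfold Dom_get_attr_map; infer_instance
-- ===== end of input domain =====

-- B replaces A's single sweep emitting index ranges from a running counter by a
-- prefix-sum table of cumulative counts plus a per-position binary search (objective: alternative).

-- ===== PORT A =====
def get_attr_map (words_dict : List (String × List String)) : List (Int × String) :=
  let attr_len : List Int :=
    words_dict.map (fun x => if x.2 ≠ [""] then PySem.List.len x.2 else 0)
  let st :=
    (PySem.List.enumerate (words_dict.map (·.1)) 0).foldl
      (fun (st : PySem.Dict Int String × Int) p =>
        let ln := PySem.List.pyGetD attr_len p.1 0   -- attr_len[i]; i is always in range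
        ((PySem.List.pyRange st.2 (st.2 + ln) 1).foldl
            (fun d word_pos => d.insert word_pos p.2) st.1,
         st.2 + ln))
      (PySem.Dict.empty, 0)
  (st.1.insert (-1) "[UNP]").items

-- ===== PORT B =====
-- the hand-written while-loop binary search of Source B (lo, hi are the Python ints, always ≥ 0,
-- so Nat and '(lo + hi) / 2' matches Python's '(lo + hi) // 2' exactly)
def pvBsearch (bounds : List Int) (i : Int) (lo hi : Nat) : Nat :=
  if lo < hi then
    let mid := (lo + hi) / 2
    if PySem.List.pyGetD bounds (mid : Int) 0 ≤ i then pvBsearch bounds i (mid + 1) hi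
    else pvBsearch bounds i lo mid
  else lo
termination_by hi - lo
decreasing_by all_goals omega

def get_attr_map_alt (words_dict : List (String × List String)) : List (Int × String) :=
  let attrs := words_dict.map (·.1)
  let st :=
    words_dict.foldl
      (fun (st : List Int × Int) p =>
        let total := st.2 + (if p.2 ≠ [""] then PySem.List.len p.2 else 0)
        (st.1 ++ [total], total)) ([], 0)
  let d :=
    (PySem.List.pyRange 0 st.2 1).foldl
      (fun (d : PySem.Dict Int String) i =>
        let lo := pvBsearch st.1 i 0 st.1.length
        d.insert i (PySem.List.pyGetD attrs (lo : Int) ""))   -- attrs[lo]; lo always in range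
      PySem.Dict.empty
  (d.insert (-1) "[UNP]").items

-- ===== PRECONDITION & SPEC =====
def Spec_get_attr_map (words_dict : List (String × List String)) (out : List (Int × String)) : Prop := out = get_attr_map_alt words_dict
instance (words_dict : List (String × List String)) (out : List (Int × String)) : Decidable (Spec_get_attr_map words_dict out) := by unfold Spec_get_attr_map; infer_instance

-- ===== CLAIM =====
def Claim_equal_get_attr_map : Prop := ∀ (words_dict : List (String × List String)), Dom_get_attr_map words_dict → Spec_get_attr_map words_dict (get_attr_map words_dict)

-- ===== LEMMAS AND PROOFS =====

-- number of positions contributed by one (attr, words) pair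
def pvCnt (p : String × List String) : Nat := if p.2 ≠ [""] then p.2.length else 0

-- the flat position → attribute table both programs realize
def pvFlat (wd : List (String × List String)) : List String :=
  wd.flatMap (fun p => List.replicate (pvCnt p) p.1)

-- B's prefix-sum table, started at offset t
def pvBounds : List (String × List String) → Int → List Int
  | [], _ => []
  | p :: tl, t => (t + (pvCnt p : Int)) :: pvBounds tl (t + (pvCnt p : Int))

lemma enumerate_replicate (a : String) (c : Nat) (s : Int) :
    PySem.List.enumerate (List.replicate c a) s
      = (PySem.List.pyRange s (s + c) 1).map (fun j => (j, a)) := by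
  induction c generalizing s with
  | zero => simp [PySem.List.pyRange]
  | succ c ih =>
      rw [List.replicate_succ, PySem.List.enumerate_cons,
          PySem.List.pyRange_one_cons (by omega : s < s + (c + 1 : Nat))]
      push_cast
      rw [ih (s + 1)]
      simp
      ring_nf

lemma keys_mk_enumerate (flat : List String) :
    (PySem.Dict.mk (PySem.List.enumerate flat 0) : PySem.Dict Int String).keys
      = PySem.List.pyRange 0 flat.length 1 := by
  show (PySem.List.enumerate flat 0).map (·.1) = _
  simpa using PySem.List.map_fst_enumerate flat 0

lemma inner_loop (flat : List String) (attr : String) (c : Nat) :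
    (PySem.List.pyRange (flat.length : Int) ((flat.length : Int) + c) 1).foldl
        (fun d word_pos => d.insert word_pos attr)
        (PySem.Dict.mk (PySem.List.enumerate flat 0))
      = PySem.Dict.mk (PySem.List.enumerate (flat ++ List.replicate c attr) 0) := by
  apply PySem.Dict.ext
  rw [show (fun (d : PySem.Dict Int String) word_pos => d.insert word_pos attr)
        = (fun d a => d.insert (id a) ((fun _ => attr) a)) from rfl]
  rw [PySem.Dict.items_foldl_insert_fresh]
  · show PySem.List.enumerate flat 0 ++ _ = _
    rw [PySem.List.enumerate_append]
    congr 1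
    rw [enumerate_replicate]
    simp
  · intro x hx
    rw [PySem.List.mem_pyRange_one] at hx
    rw [PySem.Dict.contains_eq_decide_mem_keys, keys_mk_enumerate]
    simp [PySem.List.mem_pyRange_one]
    omega
  · simpa using PySem.List.nodup_pyRange_one _ _

-- A's outer loop, generalized over the remaining tail, enumeration start and accumulated flat
lemma outer_loop (attr_len : List Int) (tail : List (String × List String)) (s : Nat)
    (flat : List String)
    (hidx : ∀ k (hk : k < tail.length),
        PySem.List.pyGetD attr_len ((s + k : Nat) : Int) 0 = (pvCnt tail[k] : Int)) :
    (PySem.List.enumerate (tail.map (·.1)) s).foldl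
      (fun (st : PySem.Dict Int String × Int) p =>
        let ln := PySem.List.pyGetD attr_len p.1 0
        ((PySem.List.pyRange st.2 (st.2 + ln) 1).foldl
            (fun d word_pos => d.insert word_pos p.2) st.1,
         st.2 + ln))
      (PySem.Dict.mk (PySem.List.enumerate flat 0), (flat.length : Int))
      = (PySem.Dict.mk (PySem.List.enumerate (flat ++ pvFlat tail) 0),
         ((flat ++ pvFlat tail).length : Int)) := by
  induction tail generalizing s flat with
  | nil => simp [pvFlat]
  | cons hd tl ih =>
      rw [List.map_cons, PySem.List.enumerate_cons, List.foldl_cons]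
      have h0 := hidx 0 (by simp)
      simp only [List.getElem_cons_zero, Nat.add_zero] at h0
      simp only [h0, inner_loop flat hd.1 (pvCnt hd)]
      have : ((flat.length : Int) + (pvCnt hd : Int))
          = ((flat ++ List.replicate (pvCnt hd) hd.1).length : Int) := by
        simp
      rw [this]
      have := ih (s + 1) (flat ++ List.replicate (pvCnt hd) hd.1)
        (fun k hk => by
          have := hidx (k + 1) (by simpa using Nat.succ_lt_succ hk)
          simpa [Nat.add_comm, Nat.add_assoc, Nat.add_left_comm] using this)
      rw [show ((s : Int) + 1) = ((s + 1 : Nat) : Int) by push_cast; ring]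
      rw [this]
      simp [pvFlat]

lemma a_idx (wd : List (String × List String)) (k : Nat) (hk : k < wd.length) :
    PySem.List.pyGetD (wd.map (fun x => if x.2 ≠ [""] then PySem.List.len x.2 else 0))
        ((k : Nat) : Int) 0 = (pvCnt wd[k] : Int) := by
  rw [PySem.List.pyGetD_natCast]
  rw [List.getD_eq_getElem _ _ (by simpa using hk)]
  simp [pvCnt, PySem.List.len_eq]

-- B's first loop computes (pvBounds, running total)
lemma b_bounds (wd : List (String × List String)) (acc : List Int) (t : Int) :
    wd.foldl
      (fun (st : List Int × Int) p =>
        let total := st.2 + (if p.2 ≠ [""] then PySem.List.len p.2 else 0)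
        (st.1 ++ [total], total)) (acc, t)
      = (acc ++ pvBounds wd t, t + ((pvFlat wd).length : Int)) := by
  induction wd generalizing acc t with
  | nil => simp [pvFlat, pvBounds]
  | cons p tl ih =>
      have hc : (if p.2 ≠ [""] then PySem.List.len p.2 else 0) = (pvCnt p : Int) := by
        simp only [pvCnt]; split_ifs <;> simp [PySem.List.len_eq]
      simp only [List.foldl_cons, hc, ih]
      rw [Prod.mk.injEq]
      refine ⟨by simp [pvBounds], by simp [pvFlat]; ring⟩

lemma pvBounds_length (wd : List (String × List String)) (t : Int) :
    (pvBounds wd t).length = wd.length := by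
  induction wd generalizing t with
  | nil => rfl
  | cons p tl ih => simp [pvBounds, ih]

lemma pvBounds_lb (wd : List (String × List String)) (t : Int) :
    ∀ x ∈ pvBounds wd t, t ≤ x := by
  induction wd generalizing t with
  | nil => simp [pvBounds]
  | cons p tl ih =>
      intro x hx
      simp only [pvBounds, List.mem_cons] at hx
      rcases hx with h | h
      · omega
      · have := ih _ _ h; omega

lemma pvBounds_mono (wd : List (String × List String)) (t : Int) :
    ∀ j k, j ≤ k → k < wd.length →
      (pvBounds wd t).getD j 0 ≤ (pvBounds wd t).getD k 0 := by
  induction wd generalizing t with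
  | nil => intro j k _ hk; simp at hk
  | cons p tl ih =>
      intro j k hjk hk
      match j, k with
      | 0, 0 => rfl
      | 0, k + 1 =>
          simp only [pvBounds, List.getD_cons_zero, List.getD_cons_succ]
          have hk' : k < tl.length := by simpa using hk
          rw [List.getD_eq_getElem _ _ (by rw [pvBounds_length]; exact hk')]
          exact pvBounds_lb _ _ _ (List.getElem_mem _)
      | j + 1, k + 1 =>
          simp only [pvBounds, List.getD_cons_succ]
          exact ih _ _ _ (by omega) (by simpa using hk)

lemma pvBounds_last (wd : List (String × List String)) (t : Int) (h : wd ≠ []) :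
    (pvBounds wd t).getD (wd.length - 1) 0 = t + ((pvFlat wd).length : Int) := by
  induction wd generalizing t with
  | nil => exact absurd rfl h
  | cons p tl ih =>
      by_cases htl : tl = []
      · subst htl; simp [pvBounds, pvFlat]
      · have hlen : tl.length ≠ 0 := by simpa using htl
        have : (p :: tl).length - 1 = (tl.length - 1) + 1 := by
          simp [List.length_cons]; omega
        rw [this]
        simp only [pvBounds, List.getD_cons_succ]
        rw [ih _ htl]
        simp [pvFlat]
        ring

-- correctness of the hand-written binary search on a monotone table
lemma bsearch_spec (bounds : List Int) (i : Int)
    (hmono : ∀ j k, j ≤ k → k < bounds.length →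
        bounds.getD j 0 ≤ bounds.getD k 0) :
    ∀ (n lo hi : Nat), hi - lo ≤ n → lo ≤ hi → hi ≤ bounds.length →
      lo ≤ pvBsearch bounds i lo hi ∧ pvBsearch bounds i lo hi ≤ hi ∧
      (∀ j, lo ≤ j → j < pvBsearch bounds i lo hi → bounds.getD j 0 ≤ i) ∧
      (∀ j, pvBsearch bounds i lo hi ≤ j → j < hi → i < bounds.getD j 0) := by
  intro n
  induction n with
  | zero =>
      intro lo hi hn hlh hhl
      have : ¬ lo < hi := by omega
      rw [pvBsearch, if_neg this]
      exact ⟨le_refl _, hlh, fun j h1 h2 => absurd h2 (by omega),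
             fun j h1 h2 => absurd h2 (by omega)⟩
  | succ n ih =>
      intro lo hi hn hlh hhl
      by_cases hlt : lo < hi
      · rw [pvBsearch, if_pos hlt]
        simp only [PySem.List.pyGetD_natCast]
        by_cases hmid : bounds.getD ((lo + hi) / 2) 0 ≤ i
        · rw [if_pos hmid]
          have hrec := ih ((lo + hi) / 2 + 1) hi (by omega) (by omega) hhl
          refine ⟨by omega, hrec.2.1, ?_, hrec.2.2.2⟩
          intro j h1 h2
          by_cases hj : j ≤ (lo + hi) / 2
          · exact le_trans (hmono j ((lo + hi) / 2) hj (by omega)) hmid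
          · exact hrec.2.2.1 j (by omega) h2
        · rw [if_neg hmid]
          have hrec := ih lo ((lo + hi) / 2) (by omega) (by omega) (by omega)
          refine ⟨hrec.1, by omega, hrec.2.2.1, ?_⟩
          intro j h1 h2
          by_cases hj : j < (lo + hi) / 2
          · exact hrec.2.2.2 j h1 hj
          · have := hmono ((lo + hi) / 2) j (by omega) (by omega)
            omega
      · rw [pvBsearch, if_neg hlt]
        exact ⟨le_refl _, hlh, fun j h1 h2 => absurd h2 (by omega),
               fun j h1 h2 => absurd h2 (by omega)⟩

-- indexing the flat table through the prefix-sum table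
lemma flat_getD (wd : List (String × List String)) :
    ∀ (t : Int) (i : Nat) (r : Nat),
      i < (pvFlat wd).length →
      (∀ j, j < r → (pvBounds wd t).getD j 0 ≤ t + i) →
      r < wd.length →
      t + i < (pvBounds wd t).getD r 0 →
      (pvFlat wd).getD i "" = (wd.map (·.1)).getD r "" := by
  induction wd with
  | nil => intro t i r _ _ hr _; simp at hr
  | cons p tl ih =>
      intro t i r hi h1 hr h2
      have hflat : pvFlat (p :: tl) = List.replicate (pvCnt p) p.1 ++ pvFlat tl := by
        simp [pvFlat]
      match r with
      | 0 =>
          simp only [pvBounds, List.getD_cons_zero] at h2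
          have hic : i < pvCnt p := by omega
          rw [hflat, List.getD_eq_getElem _ _ (by simp; omega),
              List.getElem_append_left (by simpa using hic)]
          simp
      | r + 1 =>
          have hci : pvCnt p ≤ i := by
            have := h1 0 (by omega)
            simp only [pvBounds, List.getD_cons_zero] at this
            omega
          have hstep : (pvFlat (p :: tl)).getD i "" = (pvFlat tl).getD (i - pvCnt p) "" := by
            rw [hflat, List.getD_append_right _ _ _ _ (by simpa using hci)]
            simp
          rw [hstep]
          have hmap : ((p :: tl).map (·.1)).getD (r + 1) "" = (tl.map (·.1)).getD r "" := by
            simp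
          rw [hmap]
          have hcast : t + (pvCnt p : Int) + ((i - pvCnt p : Nat) : Int) = t + i := by
            push_cast [hci]; ring
          apply ih (t + (pvCnt p : Int)) (i - pvCnt p) r
          · rw [hflat] at hi; simp at hi; omega
          · intro j hj
            have := h1 (j + 1) (by omega)
            simp only [pvBounds, List.getD_cons_succ] at this
            rw [hcast]; exact this
          · simpa using hr
          · simp only [pvBounds, List.getD_cons_succ] at h2
            rw [hcast]; exact h2

-- B's dict equals Dict.mk of the mapped range
lemma b_dict (total : Int) (g : Int → String) :
    (PySem.List.pyRange 0 total 1).foldl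
        (fun (d : PySem.Dict Int String) i => d.insert i (g i)) PySem.Dict.empty
      = PySem.Dict.mk ((PySem.List.pyRange 0 total 1).map (fun i => (i, g i))) := by
  apply PySem.Dict.ext
  rw [show (fun (d : PySem.Dict Int String) i => d.insert i (g i))
        = (fun d a => d.insert (id a) (g a)) from rfl]
  rw [PySem.Dict.items_foldl_insert_fresh]
  · simp [PySem.Dict.empty]
  · simp [PySem.Dict.empty]
  · simpa using PySem.List.nodup_pyRange_one _ _

-- the two item lists agree
lemma items_agree (wd : List (String × List String)) :
    PySem.List.enumerate (pvFlat wd) 0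
      = (PySem.List.pyRange 0 (((pvFlat wd).length : Int)) 1).map
          (fun i => (i, PySem.List.pyGetD (wd.map (·.1))
              ((pvBsearch (pvBounds wd 0) i 0 (pvBounds wd 0).length : Nat) : Int) "")) := by
  rw [PySem.List.enumerate_eq_map_pyRange (d := "")]
  rw [PySem.List.len_eq]
  apply List.map_congr_left
  intro j hj
  rw [PySem.List.mem_pyRange_one] at hj
  obtain ⟨i, rfl⟩ : ∃ i : Nat, j = (i : Int) := ⟨j.toNat, by omega⟩
  have hi : i < (pvFlat wd).length := by exact_mod_cast hj.2
  have hmono := pvBounds_mono wd 0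
  have hmono' : ∀ a b, a ≤ b → b < (pvBounds wd 0).length →
      (pvBounds wd 0).getD a 0 ≤ (pvBounds wd 0).getD b 0 := by
    intro a b hab hb
    exact hmono a b hab (by rwa [pvBounds_length] at hb)
  have hspec := bsearch_spec (pvBounds wd 0) (i : Int) hmono'
      (pvBounds wd 0).length 0 (pvBounds wd 0).length (by omega) (by omega) (le_refl _)
  set r := pvBsearch (pvBounds wd 0) (i : Int) 0 (pvBounds wd 0).length with hr
  have hwdne : wd ≠ [] := by
    intro h; subst h; simp [pvFlat] at hi
  have hrlt : r < wd.length := by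
    by_contra hge
    have hreq : r = (pvBounds wd 0).length := by
      rw [pvBounds_length]; have := hspec.2.1; rw [pvBounds_length] at this; omega
    have hwdpos : 0 < wd.length := List.length_pos_of_ne_nil hwdne
    have hlast := hspec.2.2.1 (wd.length - 1) (by omega)
        (by rw [hreq, pvBounds_length]; omega)
    rw [pvBounds_last wd 0 hwdne] at hlast
    omega
  have hupper := hspec.2.2.2 r (le_refl _) (by rwa [pvBounds_length])
  have hflat := flat_getD wd 0 i r hi
      (fun k hk => by simpa using hspec.2.2.1 k (by omega) hk)
      hrlt (by simpa using hupper)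
  simp only [PySem.List.pyGetD_natCast]
  rw [hflat]

-- ===== VERDICT =====
theorem get_attr_map_spec : Claim_equal_get_attr_map := by
  intro wd _
  show get_attr_map wd = get_attr_map_alt wd
  simp only [get_attr_map, get_attr_map_alt]
  rw [b_bounds wd [] 0]
  simp only [List.nil_append, zero_add]
  have hA := outer_loop
    (wd.map (fun x => if x.2 ≠ [""] then PySem.List.len x.2 else 0)) wd 0 []
    (fun k hk => by simpa using a_idx wd k hk)
  simp only [List.nil_append, List.length_nil, Nat.cast_zero] at hA
  rw [b_dict ((pvFlat wd).length : Int)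
      (fun i => PySem.List.pyGetD (wd.map (·.1))
        ((pvBsearch (pvBounds wd 0) i 0 (pvBounds wd 0).length : Nat) : Int) "")]
  rw [show (PySem.Dict.empty : PySem.Dict Int String)
        = PySem.Dict.mk (PySem.List.enumerate ([] : List String) 0) from rfl]
  rw [hA]
  rw [items_agree wd]
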